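-- pv_equiv track=rewrite | github.com/sebabecerra/central-banks-board | CM/code/extract_central_bankers_from_categories.py | infer_bank_name
-- ===== SOURCE A (Python) =====
-- def infer_bank_name(category_name):
--     text = str(category_name)
--     prefixes = [
--         "Deputy governors of the ",
--         "Deputy governors of ",
--         "Governors of the ",
--         "Governors of ",
--         "Presidents of the ",
--         "Presidents of ",
--         "President of the ",
--         "President of ",
--         "Chairmen of the ",
--         "Chairmen of ",
--         "Chairwomen of the ",
--         "Chairwomen of ",
--         "Chairpersons of the ",
--         "Chairpersons of ",
--         "Chairs of the ",
--         "Chairs of ",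
--     ]
--     for prefix in prefixes:
--         if text.lower().startswith(prefix.lower()):
--             return text[len(prefix):].strip()
--     return text.strip()
-- ===== SOURCE B (Python) =====
-- import re
--
-- _PREFIXES = [
--     "Deputy governors of the ",
--     "Deputy governors of ",
--     "Governors of the ",
--     "Governors of ",
--     "Presidents of the ",
--     "Presidents of ",
--     "President of the ",
--     "President of ",
--     "Chairmen of the ",
--     "Chairmen of ",
--     "Chairwomen of the ",
--     "Chairwomen of ",
--     "Chairpersons of the ",
--     "Chairpersons of ",
--     "Chairs of the ",
--     "Chairs of ",
-- ]
--
-- # One compiled alternation of the lowercased prefixes, in A's order (first match wins).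
-- _PREFIX_RE = re.compile("|".join(re.escape(p.lower()) for p in _PREFIXES))
--
-- def infer_bank_name(category_name):
--     text = str(category_name)
--     m = _PREFIX_RE.match(text.lower())
--     if m:
--         return text[m.end():].strip()
--     return text.strip()
-- ===== Notes on version B (the rewrite author's own statement) =====
-- stated objective: idiomatic
-- what changed: Replaces A's per-prefix loop that re-lowers the text on every iteration with one lowering of the text and a single precompiled regex alternation (same prefix order, so first-match semantics are preserved), slicing the original text at match.end().
import Mathlib
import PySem

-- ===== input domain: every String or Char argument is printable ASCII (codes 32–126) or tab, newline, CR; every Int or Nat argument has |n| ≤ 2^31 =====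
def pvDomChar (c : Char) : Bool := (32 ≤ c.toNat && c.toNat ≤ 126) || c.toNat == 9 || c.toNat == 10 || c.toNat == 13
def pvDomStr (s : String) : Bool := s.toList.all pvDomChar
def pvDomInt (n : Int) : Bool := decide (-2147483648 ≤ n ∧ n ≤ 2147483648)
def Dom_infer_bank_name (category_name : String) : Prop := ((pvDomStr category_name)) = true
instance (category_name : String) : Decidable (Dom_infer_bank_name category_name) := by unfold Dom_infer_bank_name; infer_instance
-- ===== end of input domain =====

-- B replaces A's per-prefix loop (which re-lowers the text each iteration) by one lowering
-- and a single precompiled regex alternation match; objective: idiomatic/alternative.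

-- ===== PORT A =====
def pvPrefixes : List String := [
  "Deputy governors of the ",
  "Deputy governors of ",
  "Governors of the ",
  "Governors of ",
  "Presidents of the ",
  "Presidents of ",
  "President of the ",
  "President of ",
  "Chairmen of the ",
  "Chairmen of ",
  "Chairwomen of the ",
  "Chairwomen of ",
  "Chairpersons of the ",
  "Chairpersons of ",
  "Chairs of the ",
  "Chairs of "]

-- A's for-loop: recompute text.lower() and prefix.lower() each iteration, return on first hit.
def pvLoopA (text : String) : List String → String
  | [] => PySem.Str.strip text
  | p :: rest =>
    if PySem.Str.startswith (PySem.Str.lower text) (PySem.Str.lower p) then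
      PySem.Str.strip (PySem.Str.slice text (some (p.length : Int)) none)
    else pvLoopA text rest

def infer_bank_name (category_name : String) : String :=
  pvLoopA category_name pvPrefixes

-- ===== PORT B =====
-- the compiled regex: an ordered alternation of the 16 lowercased literal prefixes;
-- re.match on the lowered text = first alternative that is a prefix of it.
def pvLowPrefixes : List String := [
  "deputy governors of the ",
  "deputy governors of ",
  "governors of the ",
  "governors of ",
  "presidents of the ",
  "presidents of ",
  "president of the ",
  "president of ",
  "chairmen of the ",
  "chairmen of ",
  "chairwomen of the ",
  "chairwomen of ",
  "chairpersons of the ",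
  "chairpersons of ",
  "chairs of the ",
  "chairs of "]

def infer_bank_name_alt (category_name : String) : String :=
  let low := PySem.Str.lower category_name
  match pvLowPrefixes.find? (fun p => PySem.Str.startswith low p) with
  | some p => PySem.Str.strip (PySem.Str.slice category_name (some (p.length : Int)) none)  -- text[m.end():].strip()
  | none => PySem.Str.strip category_name

-- ===== PRECONDITION & SPEC =====
def Spec_infer_bank_name (category_name : String) (out : String) : Prop := out = infer_bank_name_alt category_name
instance (category_name : String) (out : String) : Decidable (Spec_infer_bank_name category_name out) := by unfold Spec_infer_bank_name; infer_instance

-- ===== CLAIM (what is proved, stated in full; the proofs are below) =====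
def Claim_equal_infer_bank_name : Prop := ∀ (category_name : String), Dom_infer_bank_name category_name → Spec_infer_bank_name category_name (infer_bank_name category_name)

-- ===== LEMMAS AND PROOFS =====

theorem pv_lower_length (s : String) : (PySem.Str.lower s).length = s.length := by
  have h2 : (PySem.Str.lower s).toList.length = s.toList.length := by
    rw [PySem.Str.toList_lower]; simp [PySem.Chars.lower]
  rw [← String.length_toList, h2, String.length_toList]

theorem pvLoopA_eq_find (text : String) (ps : List String) :
    pvLoopA text ps =
      (match (ps.map PySem.Str.lower).find?
          (fun p => PySem.Str.startswith (PySem.Str.lower text) p) with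
       | some p => PySem.Str.strip (PySem.Str.slice text (some (p.length : Int)) none)
       | none => PySem.Str.strip text) := by
  induction ps with
  | nil => rfl
  | cons p rest ih =>
    simp only [pvLoopA, List.map_cons, List.find?_cons]
    cases hb : PySem.Chars.startswith (PySem.Chars.lower text.toList) (PySem.Chars.lower p.toList) with
    | true => simp [hb, pv_lower_length]
    | false => simp [hb, ih]

theorem pvLowPrefixes_eq : pvLowPrefixes = pvPrefixes.map PySem.Str.lower := by decide

-- ===== VERDICT (by name: the statement is the Claim_ definition above) =====
theorem infer_bank_name_spec : Claim_equal_infer_bank_name := by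
  intro category_name _
  unfold Spec_infer_bank_name infer_bank_name infer_bank_name_alt
  rw [pvLowPrefixes_eq, pvLoopA_eq_find]
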